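-- pv_equiv track=rewrite | github.com/driven-telematics/speeding-algorithm | driven_speeding_definition.py | driven_defined_speeding_events
-- ===== SOURCE A (Python) =====
-- def driven_defined_speeding_events(points):
--     """Detects speeding events where the driver exceeds the speed limit by 11+ mph for at least 5 seconds."""
--     speeding_events = []
--     current_event = []
--     speeding_event_counter = 0
--     start_time = None
--
--     for point in points:
--         excess_speed = point['speed'] - point['limit']
--
--         if excess_speed >= 11 and point['limit'] > 0:
--             if not current_event: # start of a new speeding event
--                 start_time = point['timestamp']
--             current_event.append(point)
--         else:
--             # If we were in a speeding event and now we're not, check if it met the 5s requirement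
--             if current_event and start_time is not None and (current_event[-1]['timestamp'] - start_time) >= 5:
--                 speeding_events.append(current_event.copy())
--                 speeding_event_counter += 1
--             current_event = []
--             start_time = None
--
--     # Final check in case the last event meets the requirement
--     if current_event and start_time is not None and (current_event[-1]['timestamp'] - start_time) >= 5:
--         speeding_events.append(current_event)
--
--     return speeding_events, speeding_event_counter
-- ===== SOURCE B (Python) =====
-- def driven_defined_speeding_events(points):
--     """Detects speeding events (11+ mph over a positive limit for >= 5 seconds).
--
--     Boundary-index decomposition instead of a stateful scan: compute the
--     per-point speeding flags, locate run starts (a flagged point whose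
--     predecessor is unflagged) and run ends (a flagged point whose successor is
--     unflagged) by adjacent-flag comparison, slice the runs out of `points`, and
--     filter them by duration.  The counter is len(events) (A fails to count an
--     event that runs to the very end of the trace; here it is counted)."""
--     flags = [p['speed'] - p['limit'] >= 11 and p['limit'] > 0 for p in points]
--     n = len(points)
--     starts = [i for i in range(n) if flags[i] and (i == 0 or not flags[i - 1])]
--     ends = [i + 1 for i in range(n) if flags[i] and (i + 1 == n or not flags[i + 1])]
--     runs = [points[s:e] for s, e in zip(starts, ends)]
--     events = [r for r in runs if r[-1]['timestamp'] - r[0]['timestamp'] >= 5]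
--     return events, len(events)
-- ===== Notes on version B (the rewrite author's own statement) =====
-- stated objective: alternative
-- what changed: B replaces A's single stateful scan (current_event/start_time/counter mutated per point) with a boundary-index decomposition: compute per-point speeding flags, find run starts and run ends by comparing each flag with its neighbour, slice the runs out of the list by index, filter by duration, and return len(events) as the counter.
-- intended difference: On inputs whose trailing maximal speeding run lasts >= 5 seconds (a speeding event still in progress at the last point), A appends that event to the list but forgets to increment the counter, returning counter = len(events) - 1; B returns counter = len(events), the intended count of detected events. — e.g. on driven_defined_speeding_events([[("speed", 80), ("limit", 30), ("timestamp", 0)], [("speed", 80), ("limit", 30), ("timestamp", 5)]]): A returns ([[[("speed", 80), ("limit", 30), ("timestamp", 0)], [("speed", 80), ("limit", 30), ("timestamp", 5)]]], 0), B returns ([[[("speed", 80), ("limit", 30), ("timestamp", 0)], [("speed", 80), ("limit", 30), ("timestamp", 5)]]], 1)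
import Mathlib
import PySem

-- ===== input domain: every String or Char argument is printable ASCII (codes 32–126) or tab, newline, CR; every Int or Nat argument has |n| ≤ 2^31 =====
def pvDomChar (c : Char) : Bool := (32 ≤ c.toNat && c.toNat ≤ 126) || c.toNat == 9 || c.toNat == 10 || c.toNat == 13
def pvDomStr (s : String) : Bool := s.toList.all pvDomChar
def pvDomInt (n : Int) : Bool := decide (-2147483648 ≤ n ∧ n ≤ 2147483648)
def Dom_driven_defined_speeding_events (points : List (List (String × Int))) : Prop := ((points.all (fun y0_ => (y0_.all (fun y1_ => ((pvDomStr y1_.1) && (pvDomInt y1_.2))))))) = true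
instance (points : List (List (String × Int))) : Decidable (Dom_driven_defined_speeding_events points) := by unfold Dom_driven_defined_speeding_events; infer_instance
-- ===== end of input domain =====

-- B replaces A's single stateful scan by a boundary-index decomposition (flags, run
-- start/end indices by adjacent-flag comparison, slicing, duration filter) and fixes A's
-- counter bug (a trailing speeding event is listed but not counted by A).

-- ===== PORT A =====
-- point['k'] lookup; the default 0 is never read inside Pre_ (A raises KeyError outside it)
def pvGetA (p : List (String × Int)) (k : String) : Int := (PySem.Dict.mk p).getD k 0

-- the body of A's for-loop, state = (speeding_events, current_event, counter, start_time)
def pvStepA (st : (List (List (List (String × Int)))) × (List (List (String × Int))) × Int × Option Int)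
    (point : List (String × Int)) :
    (List (List (List (String × Int)))) × (List (List (String × Int))) × Int × Option Int :=
  match st with
  | (evs, cur, cnt, start) =>
    let excess := pvGetA point "speed" - pvGetA point "limit"
    if excess ≥ 11 ∧ pvGetA point "limit" > 0 then
      let start' := if cur.isEmpty then some (pvGetA point "timestamp") else start
      (evs, cur ++ [point], cnt, start')
    else
      match start with
      | some s0 =>
        if cur ≠ [] ∧ pvGetA (cur.getLast?.getD []) "timestamp" - s0 ≥ 5 then
          (evs ++ [cur], [], cnt + 1, none)
        else (evs, [], cnt, none)
      | none => (evs, [], cnt, none)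

-- A's final check after the loop
def pvFinishA (st : (List (List (List (String × Int)))) × (List (List (String × Int))) × Int × Option Int) :
    (List (List (List (String × Int)))) × Int :=
  match st with
  | (evs, cur, cnt, start) =>
    match start with
    | some s0 =>
      if cur ≠ [] ∧ pvGetA (cur.getLast?.getD []) "timestamp" - s0 ≥ 5 then (evs ++ [cur], cnt)
      else (evs, cnt)
    | none => (evs, cnt)

def driven_defined_speeding_events (points : List (List (String × Int))) : (List (List (List (String × Int)))) × Int :=
  pvFinishA (points.foldl pvStepA ([], [], 0, none))

-- ===== PORT B =====
-- the speeding flag of one point (Source B's list of flags maps this over points)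
def pvSpeedB (p : List (String × Int)) : Bool :=
  decide ((PySem.Dict.mk p).getD "speed" 0 - (PySem.Dict.mk p).getD "limit" 0 ≥ 11 ∧
    (PySem.Dict.mk p).getD "limit" 0 > 0)

-- r[-1]['timestamp'] - r[0]['timestamp'] >= 5 (runs are nonempty, so the [] default is never read)
def pvQualB (r : List (List (String × Int))) : Bool :=
  decide ((PySem.Dict.mk (r.getLast?.getD [])).getD "timestamp" 0 -
    (PySem.Dict.mk (r.head?.getD [])).getD "timestamp" 0 ≥ 5)

-- Source B, step for step.  Indexing notes (each read is exact on its reachable arguments):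
-- flags[i] / flags[i-1] / flags[i+1] are only read in range (i ranges over range(n),
-- flags[i-1] is short-circuited away at i == 0 and flags[i+1] at i+1 == n), so .getD _ false
-- is exact; points[s:e] with 0 ≤ s ≤ e ≤ n is (points.drop s).take (e - s), Python's slice.
def driven_defined_speeding_events_alt (points : List (List (String × Int))) : (List (List (List (String × Int)))) × Int :=
  let flags := points.map pvSpeedB
  let n := points.length
  let starts := (List.range n).filter
    (fun i => flags.getD i false && (decide (i = 0) || !(flags.getD (i - 1) false)))
  let ends := ((List.range n).filter
    (fun i => flags.getD i false && (decide (i + 1 = n) || !(flags.getD (i + 1) false)))).map (· + 1)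
  let runs := (starts.zip ends).map (fun se => (points.drop se.1).take (se.2 - se.1))
  let events := runs.filter pvQualB
  (events, (events.length : Int))

-- ===== PRECONDITION & SPEC =====
-- helpers for Pre_/D_ only (independent of both ports)
def pvHasKey (p : List (String × Int)) (k : String) : Bool := (p.lookup k).isSome
def pvSpd (p : List (String × Int)) : Bool :=
  match p.lookup "speed", p.lookup "limit" with
  | some s, some l => decide (0 < l ∧ l + 11 ≤ s)
  | _, _ => false
-- first-match 'timestamp' value of a point (0 if absent; unread then, trails are speeding points)
def pvTsD (p : List (String × Int)) : Int := (p.lookup "timestamp").getD 0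
-- the maximal trailing run of speeding points
def pvTrailD (points : List (List (String × Int))) : List (List (String × Int)) :=
  (points.reverse.takeWhile pvSpd).reverse

-- Exactly the inputs where Python A returns (no KeyError): every point has 'speed' and
-- 'limit', and the first and the last point of each maximal speeding run have 'timestamp'
-- (those are the only 'timestamp' reads either program performs).
def Pre_driven_defined_speeding_events (points : List (List (String × Int))) : Prop :=
  (∀ p ∈ points, pvHasKey p "speed" = true ∧ pvHasKey p "limit" = true) ∧
  (∀ p ∈ points.head?.toList, pvSpd p = true → pvHasKey p "timestamp" = true) ∧
  (∀ p ∈ points.getLast?.toList, pvSpd p = true → pvHasKey p "timestamp" = true) ∧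
  (∀ q ∈ points.zip (points.drop 1),
    (pvSpd q.1 = false ∧ pvSpd q.2 = true → pvHasKey q.2 "timestamp" = true) ∧
    (pvSpd q.1 = true ∧ pvSpd q.2 = false → pvHasKey q.1 "timestamp" = true))
instance (points : List (List (String × Int))) : Decidable (Pre_driven_defined_speeding_events points) := by
  unfold Pre_driven_defined_speeding_events; infer_instance

def pvWitness_driven_defined_speeding_events : (List (List (String × Int))) :=
  [[("speed", 10), ("limit", 30), ("timestamp", 0)]]

-- On inputs whose trailing maximal speeding run lasts >= 5 seconds A appends that event to
-- the list but does not increment the counter (counter = len(events) - 1); B returns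
-- counter = len(events), the intended count of the events it itself returns.
def D_driven_defined_speeding_events (points : List (List (String × Int))) : Prop :=
  pvTrailD points ≠ [] ∧
  pvTsD ((pvTrailD points).head?.getD []) + 5 ≤ pvTsD ((pvTrailD points).getLast?.getD [])
instance (points : List (List (String × Int))) : Decidable (D_driven_defined_speeding_events points) := by
  unfold D_driven_defined_speeding_events; infer_instance

def Spec_driven_defined_speeding_events (points : List (List (String × Int))) (out : (List (List (List (String × Int)))) × Int) : Prop :=
  ¬ D_driven_defined_speeding_events points → out = driven_defined_speeding_events_alt points
instance (points : List (List (String × Int))) (out : (List (List (List (String × Int)))) × Int) : Decidable (Spec_driven_defined_speeding_events points out) := by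
  unfold Spec_driven_defined_speeding_events; infer_instance

def pvDiffWitness_driven_defined_speeding_events : (List (List (String × Int))) :=
  [[("speed", 80), ("limit", 30), ("timestamp", 0)], [("speed", 80), ("limit", 30), ("timestamp", 5)]]

def pvDiffWitnessOut_driven_defined_speeding_events :
    ((List (List (List (String × Int)))) × Int) × ((List (List (List (String × Int)))) × Int) :=
  (([[[("speed", 80), ("limit", 30), ("timestamp", 0)], [("speed", 80), ("limit", 30), ("timestamp", 5)]]], 0),
   ([[[("speed", 80), ("limit", 30), ("timestamp", 0)], [("speed", 80), ("limit", 30), ("timestamp", 5)]]], 1))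

-- ===== CLAIM (what is proved, stated in full; the proofs are below) =====
def Claim_unchanged_driven_defined_speeding_events : Prop := ∀ (points : List (List (String × Int))), Dom_driven_defined_speeding_events points → Pre_driven_defined_speeding_events points → Spec_driven_defined_speeding_events points (driven_defined_speeding_events points)
def Claim_changed_driven_defined_speeding_events : Prop := Dom_driven_defined_speeding_events (pvDiffWitness_driven_defined_speeding_events) ∧ Pre_driven_defined_speeding_events (pvDiffWitness_driven_defined_speeding_events) ∧ D_driven_defined_speeding_events (pvDiffWitness_driven_defined_speeding_events) ∧ driven_defined_speeding_events (pvDiffWitness_driven_defined_speeding_events) = pvDiffWitnessOut_driven_defined_speeding_events.1 ∧ driven_defined_speeding_events_alt (pvDiffWitness_driven_defined_speeding_events) = pvDiffWitnessOut_driven_defined_speeding_events.2 ∧ pvDiffWitnessOut_driven_defined_speeding_events.1 ≠ pvDiffWitnessOut_driven_defined_speeding_events.2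
def Claim_exact_driven_defined_speeding_events : Prop := ∀ (points : List (List (String × Int))), Dom_driven_defined_speeding_events points → Pre_driven_defined_speeding_events points → D_driven_defined_speeding_events points → driven_defined_speeding_events points ≠ driven_defined_speeding_events_alt points

-- ===== LEMMAS AND PROOFS =====

-- proof-side: the maximal consecutive speeding runs, as a structural recursion
def pvRunsB : List (List (String × Int)) → List (List (List (String × Int)))
  | [] => []
  | p :: ps =>
    if pvSpd p then (p :: ps.takeWhile pvSpd) :: pvRunsB (ps.dropWhile pvSpd)
    else pvRunsB ps
termination_by l => l.length
decreasing_by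
  · exact Nat.lt_succ_of_le (List.length_dropWhile_le _ _)
  · exact Nat.lt_succ_self _

-- proof-side: A's counter, computed along the run decomposition (a run reaching the end is not counted)
def pvCntC (l : List (List (String × Int))) : Int :=
  match l with
  | [] => 0
  | p :: ps =>
    if pvSpd p then
      (if (ps.dropWhile pvSpd).isEmpty then 0
       else if pvQualB (p :: ps.takeWhile pvSpd) then 1 else 0) + pvCntC (ps.dropWhile pvSpd)
    else pvCntC ps
termination_by l.length
decreasing_by
  · exact Nat.lt_succ_of_le (List.length_dropWhile_le _ _)
  · exact Nat.lt_succ_self _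

theorem pvDropWhile_head_neg {α : Type} (q : α → Bool) (r : α) (rs : List α) :
    ∀ l : List α, l.dropWhile q = r :: rs → q r = false := by
  intro l
  induction l with
  | nil => intro h; simp [List.dropWhile] at h
  | cons x xs ih =>
    intro h
    rw [List.dropWhile_cons] at h
    by_cases hx : q x = true
    · rw [if_pos hx] at h; exact ih h
    · rw [if_neg hx] at h
      cases h
      simpa using hx

theorem lookup_eq_dictGet (p : List (String × Int)) (k : String) :
    (PySem.Dict.mk p).get? k = p.lookup k := by
  induction p with
  | nil => rfl
  | cons a rest ih =>
    rcases a with ⟨k0, v⟩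
    rw [PySem.Dict.get?_mk_cons, List.lookup_cons,
      show (k == k0) = (k0 == k) from by simp [eq_comm], ih]
    cases k0 == k <;> rfl

theorem pvSpd_getD (p : List (String × Int)) :
    pvSpd p = decide (0 < (PySem.Dict.mk p).getD "limit" 0 ∧
      (PySem.Dict.mk p).getD "limit" 0 + 11 ≤ (PySem.Dict.mk p).getD "speed" 0) := by
  have hs := lookup_eq_dictGet p "speed"
  have hl := lookup_eq_dictGet p "limit"
  simp only [pvSpd, PySem.Dict.getD_eq_get?_getD, hs, hl]
  cases p.lookup "speed" <;> cases p.lookup "limit" <;> simp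
  omega

theorem speedB_eq : pvSpeedB = pvSpd := by
  funext p
  rw [pvSpd_getD]
  simp only [pvSpeedB, decide_eq_decide]
  omega

theorem pvRunsB_nil : pvRunsB [] = [] := by rw [pvRunsB]

theorem pvRunsB_cons_neg (p : List (String × Int)) (ps : List (List (String × Int)))
    (hp : pvSpd p = false) : pvRunsB (p :: ps) = pvRunsB ps := by
  rw [pvRunsB, if_neg (by simp [hp])]

theorem pvRunsB_cons_pos (p : List (String × Int)) (ps : List (List (String × Int)))
    (hp : pvSpd p = true) :
    pvRunsB (p :: ps) = (p :: ps.takeWhile pvSpd) :: pvRunsB (ps.dropWhile pvSpd) := by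
  rw [pvRunsB, if_pos hp]

-- ---- the index-based run extraction of port B, characterized ----

-- the start condition with an explicit 'previous flag' parameter (prev = false at the top)
def pvCondS (prev : Bool) (fs : List Bool) (i : Nat) : Bool :=
  fs.getD i false && (match i with | 0 => !prev | k + 1 => !(fs.getD k false))

def pvCondE (fs : List Bool) (i : Nat) : Bool :=
  fs.getD i false && (decide (i + 1 = fs.length) || !(fs.getD (i + 1) false))

def pvFS (prev : Bool) (fs : List Bool) : List Nat :=
  (List.range fs.length).filter (pvCondS prev fs)

def pvFE (fs : List Bool) : List Nat :=
  (List.range fs.length).filter (pvCondE fs)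

def pvIdxRuns (points : List (List (String × Int))) : List (List (List (String × Int))) :=
  ((pvFS false (points.map pvSpeedB)).zip ((pvFE (points.map pvSpeedB)).map (· + 1))).map
    (fun se => (points.drop se.1).take (se.2 - se.1))

theorem pvFilter_range_succ (c : Nat → Bool) (n : Nat) :
    (List.range (n + 1)).filter c =
      (if c 0 then [0] else []) ++ ((List.range n).filter (fun i => c (i + 1))).map (· + 1) := by
  rw [List.range_succ_eq_map, List.filter_cons, List.filter_map]
  simp only [Function.comp_def, Nat.succ_eq_add_one]
  cases h : c 0 <;> simp

theorem pvFS_cons (prev b : Bool) (fs : List Bool) :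
    pvFS prev (b :: fs) = (if b && !prev then [0] else []) ++ (pvFS b fs).map (· + 1) := by
  unfold pvFS
  rw [List.length_cons, pvFilter_range_succ]
  have hfun : (fun i => pvCondS prev (b :: fs) (i + 1)) = pvCondS b fs := by
    funext i
    cases i <;> simp [pvCondS]
  have h0 : pvCondS prev (b :: fs) 0 = (b && !prev) := by simp [pvCondS]
  rw [hfun, h0]

theorem pvFE_cons (b : Bool) (fs : List Bool) :
    pvFE (b :: fs) = (if b && !(fs.getD 0 false) then [0] else []) ++ (pvFE fs).map (· + 1) := by
  unfold pvFE
  rw [List.length_cons, pvFilter_range_succ]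
  have hfun : (fun i => pvCondE (b :: fs) (i + 1)) = pvCondE fs := by
    funext i
    simp [pvCondE]
  have h0 : pvCondE (b :: fs) 0 = (b && !(fs.getD 0 false)) := by
    cases fs <;> simp [pvCondE]
  rw [hfun, h0]

theorem pvMap_add_add (l : List Nat) (a b : Nat) :
    (l.map (· + a)).map (· + b) = l.map (· + (a + b)) := by
  simp [List.map_map, Function.comp_def, Nat.add_assoc]

theorem pvFS_true_rep (j : Nat) : pvFS true (List.replicate j true) = [] := by
  induction j with
  | zero => rfl
  | succ j ih => rw [List.replicate_succ, pvFS_cons, ih]; simp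

theorem pvFS_true_run (j : Nat) (rest : List Bool) :
    pvFS true (List.replicate j true ++ false :: rest) =
      (pvFS false rest).map (· + (j + 1)) := by
  induction j with
  | zero =>
    rw [List.replicate_zero, List.nil_append, pvFS_cons]
    simp
  | succ j ih =>
    rw [List.replicate_succ, List.cons_append, pvFS_cons, ih]
    simp

theorem pvFE_rep (j : Nat) :
    pvFE (List.replicate j true) = (if j = 0 then [] else [j - 1]) := by
  induction j with
  | zero => rfl
  | succ j ih =>
    rw [List.replicate_succ, pvFE_cons, ih]
    cases j with
    | zero => rfl
    | succ k => simp [List.replicate_succ]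

theorem pvFE_run (j : Nat) (rest : List Bool) :
    pvFE (List.replicate j true ++ false :: rest) =
      (if j = 0 then [] else [j - 1]) ++ (pvFE rest).map (· + (j + 1)) := by
  induction j with
  | zero =>
    rw [List.replicate_zero, List.nil_append, pvFE_cons]
    simp
  | succ j ih =>
    rw [List.replicate_succ, List.cons_append, pvFE_cons, ih]
    cases j with
    | zero => simp
    | succ k => simp [List.replicate_succ]

-- the flag list of the speeding prefix is a replicate of trues
theorem pvFlags_split (ps : List (List (String × Int))) :
    ps.map pvSpeedB = List.replicate (ps.takeWhile pvSpd).length true ++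
      ((ps.dropWhile pvSpd).map pvSpeedB) := by
  conv_lhs => rw [← List.takeWhile_append_dropWhile (p := pvSpd) (l := ps)]
  rw [List.map_append]
  congr 1
  rw [List.eq_replicate_iff]
  refine ⟨by simp, ?_⟩
  intro b hb
  rcases List.mem_map.mp hb with ⟨x, hx, rfl⟩
  rw [speedB_eq]
  exact List.mem_takeWhile_imp hx

theorem pvIdxRuns_eq_aux : ∀ (n : Nat) (pts : List (List (String × Int))), pts.length ≤ n →
    pvIdxRuns pts = pvRunsB pts := by
  intro n
  induction n with
  | zero =>
    intro pts hlen
    have : pts = [] := List.length_eq_zero_iff.mp (Nat.le_zero.mp hlen)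
    subst this; simp [pvIdxRuns, pvFS, pvFE, pvRunsB]
  | succ n ih =>
    intro pts hlen
    match pts with
    | [] => simp [pvIdxRuns, pvFS, pvFE, pvRunsB]
    | p :: ps =>
      by_cases hp : pvSpd p = true
      · have hpb : pvSpeedB p = true := by rw [speedB_eq]; exact hp
        have hsplit := pvFlags_split ps
        set q := ps.takeWhile pvSpd with hq
        set r := ps.dropWhile pvSpd with hr
        set j := q.length with hj
        have hps : ps = q ++ r := (List.takeWhile_append_dropWhile).symm
        cases hrc : r with
        | nil =>
          have hfs : (p :: ps).map pvSpeedB = List.replicate (j + 1) true := by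
            rw [List.map_cons, hpb, hsplit, hrc]
            simp [List.replicate_succ]
          have hpsq : ps = q := by rw [hps, hrc, List.append_nil]
          unfold pvIdxRuns
          rw [hfs, pvFE_rep, List.replicate_succ, pvFS_cons, pvFS_true_rep]
          simp only [Bool.not_false, Bool.and_true, List.map_nil,
            List.append_nil, if_neg (Nat.succ_ne_zero j), Nat.succ_sub_one]
          rw [pvRunsB_cons_pos p ps hp, ← hq, ← hr, hrc, pvRunsB_nil]
          rw [hpsq]
          simp [hj, List.take_succ_cons, List.take_length]
        | cons r0 r' =>
          have hr0 : pvSpd r0 = false := pvDropWhile_head_neg pvSpd r0 r' ps (hr ▸ hrc)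
          have hfs : (p :: ps).map pvSpeedB =
              List.replicate (j + 1) true ++ false :: (r'.map pvSpeedB) := by
            rw [List.map_cons, hpb, hsplit, hrc, List.map_cons,
              show pvSpeedB r0 = false from by rw [speedB_eq]; exact hr0]
            simp [List.replicate_succ]
          unfold pvIdxRuns
          rw [hfs, pvFE_run, List.replicate_succ, List.cons_append, pvFS_cons, pvFS_true_run]
          simp only [Bool.not_false, Bool.and_true,
            if_neg (Nat.succ_ne_zero j), Nat.succ_sub_one]
          have hIH : pvIdxRuns r' = pvRunsB r' := by
            apply ih
            have h1 : r.length ≤ ps.length := hr ▸ List.length_dropWhile_le _ _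
            rw [hrc] at h1
            simp only [List.length_cons] at h1 hlen ⊢
            omega
          rw [pvRunsB_cons_pos p ps hp, ← hq, ← hr, hrc, pvRunsB_cons_neg r0 r' hr0, ← hIH]
          unfold pvIdxRuns
          rw [pvMap_add_add, List.map_append]
          have e2' : List.map (fun x => x + 1) (List.map (fun x => x + (j + 1 + 1)) (pvFE (r'.map pvSpeedB))) =
              List.map (fun x => x + (j + 1 + 1)) (List.map (fun x => x + 1) (pvFE (r'.map pvSpeedB))) := by
            rw [List.map_map, List.map_map]
            congr 1
            funext x
            simp [Function.comp]
            omega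
          rw [e2', if_pos trivial, List.singleton_append,
            show List.map (fun x => x + 1) [j] = [j + 1] from rfl, List.singleton_append,
            List.zip_cons_cons, List.zip_map, List.map_cons, List.map_map]
          congr 1
          · -- the first run: points[0 : j+1] = p :: q
            show List.take (j + 1 - 0) (List.drop 0 (p :: ps)) = p :: q
            rw [Nat.sub_zero, List.drop_zero, List.take_succ_cons, hps, hrc]
            rw [List.take_left' hj.symm]
          · -- the shifted tail runs
            congr 1
            funext se
            have hdrop : ∀ (s : Nat), (p :: ps).drop (s + (j + 1 + 1)) = r'.drop s := by
              intro s
              have hlenpre : (p :: (q ++ [r0])).length = j + 1 + 1 := by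
                simp [← hj]
              have hsplit2 : p :: ps = (p :: (q ++ [r0])) ++ r' := by
                rw [hps, hrc]; simp
              rw [hsplit2, Nat.add_comm s (j + 1 + 1), ← hlenpre, List.drop_append]
              simp
            simp only [Function.comp, Prod.map]
            rw [hdrop, Nat.add_sub_add_right]
      · have hp' : pvSpd p = false := by simpa using hp
        have hpb : pvSpeedB p = false := by rw [speedB_eq]; exact hp'
        have hIH : pvIdxRuns ps = pvRunsB ps :=
          ih ps (by simpa using Nat.le_of_succ_le_succ hlen)
        rw [pvRunsB_cons_neg p ps hp', ← hIH]
        unfold pvIdxRuns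
        rw [List.map_cons, hpb, pvFS_cons, pvFE_cons]
        simp only [Bool.false_and, Bool.false_eq_true, if_false, List.nil_append]
        rw [List.zip_map, List.map_map]
        congr 1
        funext se
        simp [Function.comp, Prod.map, Nat.succ_sub_succ]

theorem pvIdxRuns_eq (pts : List (List (String × Int))) : pvIdxRuns pts = pvRunsB pts :=
  pvIdxRuns_eq_aux pts.length pts (le_refl _)

-- port B, rewritten through the run characterization
theorem pvAlt_eq (points : List (List (String × Int))) :
    driven_defined_speeding_events_alt points =
      ((pvRunsB points).filter pvQualB, (((pvRunsB points).filter pvQualB).length : Int)) := by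
  have hS : ((List.range points.length).filter
      (fun i => (points.map pvSpeedB).getD i false &&
        (decide (i = 0) || !((points.map pvSpeedB).getD (i - 1) false)))) =
      pvFS false (points.map pvSpeedB) := by
    unfold pvFS
    rw [List.length_map]
    congr 1
    funext i
    cases i <;> simp [pvCondS]
  have hE : ((List.range points.length).filter
      (fun i => (points.map pvSpeedB).getD i false &&
        (decide (i + 1 = points.length) || !((points.map pvSpeedB).getD (i + 1) false)))) =
      pvFE (points.map pvSpeedB) := by
    unfold pvFE
    rw [List.length_map]
    congr 1
    funext i
    simp [pvCondE, List.length_map]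
  unfold driven_defined_speeding_events_alt
  simp only []
  rw [hS, hE, ← pvIdxRuns_eq]
  rfl

theorem pvStepA_pos (evs : List (List (List (String × Int)))) (cur : List (List (String × Int)))
    (cnt : Int) (start : Option Int) (p : List (String × Int)) (h : pvSpd p = true) :
    pvStepA (evs, cur, cnt, start) p =
      (evs, cur ++ [p], cnt, if cur.isEmpty then some (pvGetA p "timestamp") else start) := by
  have h2 : 0 < (PySem.Dict.mk p).getD "limit" 0 ∧
      (PySem.Dict.mk p).getD "limit" 0 + 11 ≤ (PySem.Dict.mk p).getD "speed" 0 := by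
    rw [pvSpd_getD] at h; simpa using h
  have h' : pvGetA p "speed" - pvGetA p "limit" ≥ 11 ∧ pvGetA p "limit" > 0 := by
    unfold pvGetA; omega
  simp [pvStepA, h']

theorem pvStepA_neg_some (evs : List (List (List (String × Int)))) (cur : List (List (String × Int)))
    (cnt : Int) (s0 : Int) (p : List (String × Int)) (h : pvSpd p = false) :
    pvStepA (evs, cur, cnt, some s0) p =
      if cur ≠ [] ∧ pvGetA (cur.getLast?.getD []) "timestamp" - s0 ≥ 5 then
        (evs ++ [cur], [], cnt + 1, none)
      else (evs, [], cnt, none) := by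
  have h2 : ¬ (0 < (PySem.Dict.mk p).getD "limit" 0 ∧
      (PySem.Dict.mk p).getD "limit" 0 + 11 ≤ (PySem.Dict.mk p).getD "speed" 0) := by
    rw [pvSpd_getD] at h; simpa using h
  have h' : ¬ (pvGetA p "speed" - pvGetA p "limit" ≥ 11 ∧ pvGetA p "limit" > 0) := by
    unfold pvGetA; omega
  simp [pvStepA, h']

theorem pvStepA_neg_none (evs : List (List (List (String × Int)))) (cur : List (List (String × Int)))
    (cnt : Int) (p : List (String × Int)) (h : pvSpd p = false) :
    pvStepA (evs, cur, cnt, none) p = (evs, [], cnt, none) := by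
  have h2 : ¬ (0 < (PySem.Dict.mk p).getD "limit" 0 ∧
      (PySem.Dict.mk p).getD "limit" 0 + 11 ≤ (PySem.Dict.mk p).getD "speed" 0) := by
    rw [pvSpd_getD] at h; simpa using h
  have h' : ¬ (pvGetA p "speed" - pvGetA p "limit" ≥ 11 ∧ pvGetA p "limit" > 0) := by
    unfold pvGetA; omega
  simp [pvStepA, h']

theorem pvFinishA_some (evs : List (List (List (String × Int)))) (cur : List (List (String × Int)))
    (cnt : Int) (s0 : Int) :
    pvFinishA (evs, cur, cnt, some s0) =
      if cur ≠ [] ∧ pvGetA (cur.getLast?.getD []) "timestamp" - s0 ≥ 5 then (evs ++ [cur], cnt)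
      else (evs, cnt) := rfl

theorem pvFoldl_run (qs : List (List (String × Int))) (hq : ∀ q ∈ qs, pvSpd q = true) :
    ∀ (evs : List (List (List (String × Int)))) (cur : List (List (String × Int)))
      (cnt : Int) (start : Option Int), cur ≠ [] →
      List.foldl pvStepA (evs, cur, cnt, start) qs = (evs, cur ++ qs, cnt, start) := by
  induction qs with
  | nil => intro evs cur cnt start _; simp
  | cons q qs ih =>
    intro evs cur cnt start hcur
    have hq1 : pvSpd q = true := hq q (by simp)
    have hqs : ∀ x ∈ qs, pvSpd x = true := fun x hx => hq x (by simp [hx])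
    rw [List.foldl_cons, pvStepA_pos _ _ _ _ _ hq1]
    have hcur' : cur.isEmpty = false := by simpa [List.isEmpty_iff] using hcur
    rw [hcur', if_neg (by simp)]
    rw [ih hqs evs (cur ++ [q]) cnt start (by simp)]
    simp

theorem pvQual_cond (run : List (List (String × Int))) (p : List (String × Int))
    (hh : run.head? = some p) :
    (run ≠ [] ∧ pvGetA (run.getLast?.getD []) "timestamp" - pvGetA p "timestamp" ≥ 5) ↔
      pvQualB run = true := by
  constructor
  · rintro ⟨_, h2⟩
    simp only [pvQualB, decide_eq_true_eq, hh]
    simpa [pvGetA] using h2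
  · intro h
    have hne : run ≠ [] := by
      intro he; subst he; simp at hh
    refine ⟨hne, ?_⟩
    simp only [pvQualB, decide_eq_true_eq, hh] at h
    simpa [pvGetA] using h

theorem pvMainA : ∀ (n : Nat) (pts : List (List (String × Int))), pts.length ≤ n →
    ∀ (evs : List (List (List (String × Int)))) (cnt : Int),
      pvFinishA (List.foldl pvStepA (evs, [], cnt, none) pts) =
        (evs ++ (pvRunsB pts).filter pvQualB, cnt + pvCntC pts) := by
  intro n
  induction n with
  | zero =>
    intro pts hlen evs cnt
    have : pts = [] := List.length_eq_zero_iff.mp (Nat.le_zero.mp hlen)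
    subst this
    simp [pvFinishA, pvRunsB_nil, pvCntC]
  | succ n ih =>
    intro pts hlen evs cnt
    match pts with
    | [] => simp [pvFinishA, pvRunsB_nil, pvCntC]
    | p :: ps =>
      by_cases hp : pvSpd p = true
      · rw [List.foldl_cons, pvStepA_pos _ _ _ _ _ hp]
        simp only [List.isEmpty_nil, if_true, List.nil_append]
        have htw : ∀ x ∈ ps.takeWhile pvSpd, pvSpd x = true := fun x hx => List.mem_takeWhile_imp hx
        have hrunsB := pvRunsB_cons_pos p ps hp
        have hcnt : pvCntC (p :: ps) =
            (if (ps.dropWhile pvSpd).isEmpty then 0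
             else if pvQualB (p :: ps.takeWhile pvSpd) then 1 else 0) + pvCntC (ps.dropWhile pvSpd) := by
          rw [pvCntC, if_pos hp]
        rw [hrunsB, hcnt]
        conv_lhs => rw [show ps = ps.takeWhile pvSpd ++ ps.dropWhile pvSpd from
          (List.takeWhile_append_dropWhile).symm]
        rw [List.foldl_append, pvFoldl_run _ htw _ _ _ _ (by simp)]
        rw [show ([p] : List (List (String × Int))) ++ ps.takeWhile pvSpd = p :: ps.takeWhile pvSpd from rfl]
        cases hr : ps.dropWhile pvSpd with
        | nil =>
          simp only [List.foldl_nil, pvFinishA_some]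
          by_cases hq : pvQualB (p :: ps.takeWhile pvSpd) = true
          · rw [if_pos ((pvQual_cond _ p rfl).mpr hq)]
            simp [pvRunsB_nil, pvCntC, hq]
          · have hq' : pvQualB (p :: ps.takeWhile pvSpd) = false := by simpa using hq
            rw [if_neg (fun hc => hq ((pvQual_cond _ p rfl).mp hc))]
            simp [pvRunsB_nil, pvCntC, hq']
        | cons r rest' =>
          have hrf : pvSpd r = false := pvDropWhile_head_neg pvSpd r rest' ps hr
          have hrunsB' : pvRunsB (r :: rest') = pvRunsB rest' :=
            pvRunsB_cons_neg r rest' hrf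
          have hcnt' : pvCntC (r :: rest') = pvCntC rest' := by
            rw [pvCntC, if_neg (by simp [hrf])]
          have hlen' : rest'.length ≤ n := by
            have h1 := List.length_dropWhile_le pvSpd ps
            rw [hr] at h1
            simp only [List.length_cons] at h1 hlen ⊢
            omega
          rw [List.foldl_cons, pvStepA_neg_some _ _ _ _ _ hrf]
          rw [hrunsB', hcnt']
          by_cases hq : pvQualB (p :: ps.takeWhile pvSpd) = true
          · rw [if_pos ((pvQual_cond _ p rfl).mpr hq)]
            rw [ih rest' hlen' (evs ++ [p :: ps.takeWhile pvSpd]) (cnt + 1)]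
            simp only [List.filter_cons, hq, if_true, List.isEmpty_cons, Bool.false_eq_true,
              if_false, Prod.mk.injEq]
            constructor
            · simp
            · ring
          · have hq' : pvQualB (p :: ps.takeWhile pvSpd) = false := by simpa using hq
            rw [if_neg (fun hc => hq ((pvQual_cond _ p rfl).mp hc))]
            rw [ih rest' hlen' evs cnt]
            simp only [List.filter_cons, hq', List.isEmpty_cons, Bool.false_eq_true, if_false,
              Prod.mk.injEq]
            constructor
            · simp
            · ring
      · have hp' : pvSpd p = false := by simpa using hp
        rw [List.foldl_cons, pvStepA_neg_none _ _ _ _ hp']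
        rw [ih ps (by simpa using Nat.le_of_succ_le_succ hlen) evs cnt]
        have hruns : pvRunsB (p :: ps) = pvRunsB ps := pvRunsB_cons_neg p ps hp'
        rw [hruns, pvCntC, if_neg (by simp [hp'])]

theorem pvDriven_eq (points : List (List (String × Int))) :
    driven_defined_speeding_events points =
      ((pvRunsB points).filter pvQualB, pvCntC points) := by
  have := pvMainA points.length points (le_refl _) [] 0
  simpa [driven_defined_speeding_events] using this

-- takeWhile stops at a failing element inside an append
theorem pvTakeWhile_append_neg {α : Type} (p : α → Bool) (y : α) (hy : p y = false) :
    ∀ (xs zs : List α), (xs ++ y :: zs).takeWhile p = xs.takeWhile p := by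
  intro xs zs
  induction xs with
  | nil => simp [hy]
  | cons x xs ih =>
    by_cases hx : p x = true
    · simp [hx, ih]
    · have hx' : p x = false := by simpa using hx
      simp [hx']

theorem pvTrail_cons_neg (p : List (String × Int)) (ps : List (List (String × Int)))
    (hp : pvSpd p = false) : pvTrailD (p :: ps) = pvTrailD ps := by
  unfold pvTrailD
  rw [List.reverse_cons, pvTakeWhile_append_neg pvSpd p hp ps.reverse []]

theorem pvTrailQual_iff (points : List (List (String × Int))) :
    D_driven_defined_speeding_events points ↔
      (pvTrailD points ≠ [] ∧ pvQualB (pvTrailD points) = true) := by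
  unfold D_driven_defined_speeding_events
  have h1 := lookup_eq_dictGet ((pvTrailD points).getLast?.getD []) "timestamp"
  have h2 := lookup_eq_dictGet ((pvTrailD points).head?.getD []) "timestamp"
  simp only [pvQualB, decide_eq_true_eq, PySem.Dict.getD_eq_get?_getD, h1, h2, pvTsD]
  constructor
  · rintro ⟨a, b⟩; exact ⟨a, by omega⟩
  · rintro ⟨a, b⟩; exact ⟨a, by omega⟩

theorem pvCntC_char : ∀ (n : Nat) (pts : List (List (String × Int))), pts.length ≤ n →
    pvCntC pts = (((pvRunsB pts).filter pvQualB).length : Int) -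
      (if pvTrailD pts ≠ [] ∧ pvQualB (pvTrailD pts) = true then 1 else 0) := by
  intro n
  induction n with
  | zero =>
    intro pts hlen
    have : pts = [] := List.length_eq_zero_iff.mp (Nat.le_zero.mp hlen)
    subst this
    simp [pvCntC, pvRunsB_nil, pvTrailD]
  | succ n ih =>
    intro pts hlen
    match pts with
    | [] => simp [pvCntC, pvRunsB_nil, pvTrailD]
    | p :: ps =>
      by_cases hp : pvSpd p = true
      · have hrunsB := pvRunsB_cons_pos p ps hp
        have hcnt : pvCntC (p :: ps) =
            (if (ps.dropWhile pvSpd).isEmpty then 0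
             else if pvQualB (p :: ps.takeWhile pvSpd) then 1 else 0) + pvCntC (ps.dropWhile pvSpd) := by
          rw [pvCntC, if_pos hp]
        rw [hrunsB, hcnt]
        cases hr : ps.dropWhile pvSpd with
        | nil =>
          have hall : ∀ x ∈ ps, pvSpd x = true := List.dropWhile_eq_nil_iff.mp hr
          have htw : ps.takeWhile pvSpd = ps := List.takeWhile_eq_self_iff.mpr hall
          have htrail : pvTrailD (p :: ps) = p :: ps := by
            unfold pvTrailD
            rw [List.takeWhile_eq_self_iff.mpr (by
              intro x hx
              rw [List.mem_reverse] at hx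
              rcases List.mem_cons.mp hx with h | h
              · subst h; exact hp
              · exact hall x h)]
            simp
          rw [htw, htrail]
          by_cases hq : pvQualB (p :: ps) = true
          · simp [pvRunsB_nil, pvCntC, hq]
          · have hq' : pvQualB (p :: ps) = false := by simpa using hq
            simp [pvRunsB_nil, pvCntC, hq']
        | cons r rest' =>
          have hrf : pvSpd r = false := pvDropWhile_head_neg pvSpd r rest' ps hr
          have hrunsB' : pvRunsB (r :: rest') = pvRunsB rest' :=
            pvRunsB_cons_neg r rest' hrf
          have hcnt' : pvCntC (r :: rest') = pvCntC rest' := by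
            rw [pvCntC, if_neg (by simp [hrf])]
          have hlen' : rest'.length ≤ n := by
            have h1 := List.length_dropWhile_le pvSpd ps
            rw [hr] at h1
            simp only [List.length_cons] at h1 hlen ⊢
            omega
          have htrail : pvTrailD (p :: ps) = pvTrailD rest' := by
            have hps : p :: ps = (p :: ps.takeWhile pvSpd) ++ r :: rest' := by
              have := List.takeWhile_append_dropWhile (p := pvSpd) (l := ps)
              rw [hr] at this
              rw [show (p :: ps.takeWhile pvSpd) ++ r :: rest' =
                p :: (ps.takeWhile pvSpd ++ r :: rest') from rfl, this]
            rw [hps]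
            unfold pvTrailD
            rw [List.reverse_append, List.reverse_cons, List.append_assoc,
              List.singleton_append]
            rw [pvTakeWhile_append_neg pvSpd r hrf rest'.reverse _]
          rw [hrunsB', hcnt', htrail, ih rest' hlen']
          by_cases hq : pvQualB (p :: ps.takeWhile pvSpd) = true
          · simp only [List.filter_cons, hq, if_true, List.isEmpty_cons, Bool.false_eq_true,
              if_false, List.length_cons]
            split_ifs <;> push_cast <;> ring
          · have hq' : pvQualB (p :: ps.takeWhile pvSpd) = false := by simpa using hq
            simp only [List.filter_cons, hq', List.isEmpty_cons, Bool.false_eq_true, if_false]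
            split_ifs <;> ring
      · have hp' : pvSpd p = false := by simpa using hp
        have hruns : pvRunsB (p :: ps) = pvRunsB ps := pvRunsB_cons_neg p ps hp'
        rw [hruns, pvCntC, if_neg (by simp [hp']), pvTrail_cons_neg p ps hp']
        exact ih ps (by simpa using Nat.le_of_succ_le_succ hlen)

-- ===== VERDICT (by name: the statement is the Claim_ definition above) =====
theorem driven_defined_speeding_events_spec : Claim_unchanged_driven_defined_speeding_events := by
  intro points _ _ hnD
  rw [pvDriven_eq, pvAlt_eq]
  have hcnt := pvCntC_char points.length points (le_refl _)
  rw [if_neg (fun hc => hnD ((pvTrailQual_iff points).mpr hc))] at hcnt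
  simp only [sub_zero] at hcnt
  rw [hcnt]

theorem driven_defined_speeding_events_changed : Claim_changed_driven_defined_speeding_events := by
  unfold Claim_changed_driven_defined_speeding_events
  refine ⟨by decide, by decide, by decide, by decide, by decide, by decide⟩

theorem driven_defined_speeding_events_tight : Claim_exact_driven_defined_speeding_events := by
  intro points _ _ hD
  rw [pvDriven_eq, pvAlt_eq]
  have hcnt := pvCntC_char points.length points (le_refl _)
  rw [if_pos ((pvTrailQual_iff points).mp hD)] at hcnt
  intro hcontra
  have h2 := congrArg Prod.snd hcontra
  simp only at h2
  omega
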